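-- pv_equiv track=rewrite | github.com/Ash-Kulkarni/advent-of-code | python/2025/day_6/main.py | find_op_ranges
-- ===== SOURCE A (Python) =====
-- def find_op_ranges(ops_line: str) -> list[tuple[int, int, str]]:
--     ranges = []
--     start, current_op = None, None
--     for i, char in enumerate(ops_line):
--         if char in "+*":
--             if start is not None:
--                 ranges.append((start, i, current_op))
--             start, current_op = i, char
--     ranges.append((start, len(ops_line), current_op))
--     return ranges
-- ===== SOURCE B (Python) =====
-- def find_op_ranges(ops_line: str) -> list[tuple[int, int, str]]:
--     ops = [(i, c) for i, c in enumerate(ops_line) if c in "+*"]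
--     bounds = [i for i, _ in ops][1:] + [len(ops_line)]
--     return [(start, end, op) for (start, op), end in zip(ops, bounds)]
-- ===== Notes on version B (the rewrite author's own statement) =====
-- stated objective: simpler
-- what changed: A's deferred-close state machine (carrying start/current_op and emitting each range when the next operator arrives) is replaced by one comprehension collecting operator positions and a zip of that table with its shifted boundaries.
-- outside the precondition, e.g. on find_op_ranges('abc'): A returns [(None, 3, None)], B returns []
import Mathlib
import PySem

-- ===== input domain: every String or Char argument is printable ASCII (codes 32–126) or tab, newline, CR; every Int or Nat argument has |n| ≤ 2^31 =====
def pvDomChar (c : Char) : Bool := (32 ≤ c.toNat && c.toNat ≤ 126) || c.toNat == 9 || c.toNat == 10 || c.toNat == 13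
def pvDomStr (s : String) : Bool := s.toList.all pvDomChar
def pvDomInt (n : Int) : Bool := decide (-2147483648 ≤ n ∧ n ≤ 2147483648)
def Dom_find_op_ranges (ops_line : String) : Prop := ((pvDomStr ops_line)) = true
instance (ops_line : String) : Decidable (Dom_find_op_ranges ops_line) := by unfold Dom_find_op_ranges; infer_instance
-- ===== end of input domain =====

-- B replaces A's deferred-close state machine by an operator-position table zipped with its
-- shifted boundaries (objective: simpler). Equivalence about the RETURN value on lines that
-- contain at least one operator (Pre_ below).

-- ===== PORT A =====
-- one loop step of A: on an operator, flush the pending (start, current_op) and remember (i, char)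
def pvStepA (st : List (Int × Int × String) × Option Int × Option Char)
    (p : Int × Char) : List (Int × Int × String) × Option Int × Option Char :=
  if p.2 = '+' ∨ p.2 = '*' then
    (match st.2.1, st.2.2 with
     | some s, some c => st.1 ++ [(s, p.1, String.singleton c)]
     | _, _ => st.1,
     some p.1, some p.2)
  else st

def find_op_ranges (ops_line : String) : List (Int × Int × String) :=
  let st := (PySem.List.enumerate ops_line.toList).foldl pvStepA ([], none, none)
  -- the final ranges.append((start, len(ops_line), current_op)); when start/current_op are still
  -- None the Python value (None, len, None) is not of the declared type (excluded by Pre_)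
  match st.2.1, st.2.2 with
  | some s, some c => st.1 ++ [(s, (ops_line.toList.length : Int), String.singleton c)]
  | _, _ => st.1

-- ===== PORT B =====
def find_op_ranges_alt (ops_line : String) : List (Int × Int × String) :=
  let ops := (PySem.List.enumerate ops_line.toList).filter (fun p => decide (p.2 = '+' ∨ p.2 = '*'))
  let bounds := (ops.map Prod.fst).drop 1 ++ [(ops_line.toList.length : Int)]
  (ops.zip bounds).map (fun pe => (pe.1.1, pe.2, String.singleton pe.1.2))

-- ===== PRECONDITION & SPEC =====
-- Pre_ excludes lines with no '+' or '*': there Python A RETURNS [(None, len, None)], a tuple of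
-- Nones that is not a value of the declared (int, int, str) tuple type; B returns [] there.
def Pre_find_op_ranges (ops_line : String) : Prop :=
  (ops_line.toList.any (fun c => decide (c = '+' ∨ c = '*'))) = true
instance (ops_line : String) : Decidable (Pre_find_op_ranges ops_line) := by
  unfold Pre_find_op_ranges; infer_instance

def pvWitness_find_op_ranges : String := "+a*bb"

def Spec_find_op_ranges (ops_line : String) (out : List (Int × Int × String)) : Prop := out = find_op_ranges_alt ops_line
instance (ops_line : String) (out : List (Int × Int × String)) : Decidable (Spec_find_op_ranges ops_line out) := by unfold Spec_find_op_ranges; infer_instance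

-- ===== CLAIM (what is proved, stated in full; the proofs are below) =====
def Claim_equal_find_op_ranges : Prop := ∀ (ops_line : String), Dom_find_op_ranges ops_line → Pre_find_op_ranges ops_line → Spec_find_op_ranges ops_line (find_op_ranges ops_line)

-- ===== LEMMAS AND PROOFS =====

-- non-operator characters do not change A's loop state: folding over the filtered list is the same
lemma foldA_filter (e : List (Int × Char)) (st : List (Int × Int × String) × Option Int × Option Char) :
    e.foldl pvStepA st = (e.filter (fun p => decide (p.2 = '+' ∨ p.2 = '*'))).foldl pvStepA st := by
  induction e generalizing st with
  | nil => rfl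
  | cons p rest ih =>
      by_cases h : p.2 = '+' ∨ p.2 = '*'
      · simp [h, ih]
      · have hstep : pvStepA st p = st := by simp [pvStepA, h]
        simp [h, ih, hstep]

-- closing A's final state after folding a list of pure operator entries equals B's zip pairing
lemma foldA_close (O : List (Int × Char)) (s L : Int) (c : Char)
    (ranges : List (Int × Int × String)) (hO : ∀ p ∈ O, p.2 = '+' ∨ p.2 = '*') :
    (match (O.foldl pvStepA (ranges, some s, some c)).2.1,
           (O.foldl pvStepA (ranges, some s, some c)).2.2 with
     | some s', some c' => (O.foldl pvStepA (ranges, some s, some c)).1 ++ [(s', L, String.singleton c')]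
     | _, _ => (O.foldl pvStepA (ranges, some s, some c)).1)
    = ranges ++ (((s, c) :: O).zip (O.map Prod.fst ++ [L])).map
        (fun pe => (pe.1.1, pe.2, String.singleton pe.1.2)) := by
  induction O generalizing s c ranges with
  | nil => simp
  | cons q rest ih =>
      have hq : q.2 = '+' ∨ q.2 = '*' := hO q (by simp)
      have hrest : ∀ p ∈ rest, p.2 = '+' ∨ p.2 = '*' := fun p hp => hO p (by simp [hp])
      have hstep : pvStepA (ranges, some s, some c) q
          = (ranges ++ [(s, q.1, String.singleton c)], some q.1, some q.2) := by
        simp [pvStepA, hq]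
      have hih := ih q.1 q.2 (ranges ++ [(s, q.1, String.singleton c)]) hrest
      simp only [List.foldl_cons, hstep]
      rw [hih]
      simp

-- ===== VERDICT (by name: the statement is the Claim_ definition above) =====

theorem find_op_ranges_spec : Claim_equal_find_op_ranges := by
  intro ops_line _ hpre
  unfold Spec_find_op_ranges find_op_ranges find_op_ranges_alt
  set l := ops_line.toList with hl
  set O := (PySem.List.enumerate l).filter (fun p => decide (p.2 = '+' ∨ p.2 = '*')) with hOdef
  have hOmem : ∀ p ∈ O, p.2 = '+' ∨ p.2 = '*' := by
    intro p hp
    have := List.of_mem_filter hp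
    simpa using this
  -- Pre_ gives a matching character, hence O is nonempty
  have hne : O ≠ [] := by
    unfold Pre_find_op_ranges at hpre
    rw [List.any_eq_true] at hpre
    obtain ⟨ch, hch, hchop⟩ := hpre
    have hch' : ch ∈ (PySem.List.enumerate l).map (·.2) := by
      rw [PySem.List.map_snd_enumerate]; exact hch
    obtain ⟨p, hpmem, hpeq⟩ := List.mem_map.mp hch'
    intro hO0
    have : p ∈ O := by
      rw [hOdef, List.mem_filter]
      exact ⟨hpmem, by simp [hpeq]; simpa using hchop⟩
    simp [hO0] at this
  obtain ⟨q, rest, hOq⟩ := List.exists_cons_of_ne_nil hne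
  rw [foldA_filter, ← hOdef, hOq]
  have hq : q.2 = '+' ∨ q.2 = '*' := hOmem q (by simp [hOq])
  have hstep0 : pvStepA ([], none, none) q = ([], some q.1, some q.2) := by
    simp [pvStepA, hq]
  have hrest : ∀ p ∈ rest, p.2 = '+' ∨ p.2 = '*' := fun p hp => hOmem p (by simp [hOq, hp])
  have := foldA_close rest q.1 (l.length : Int) q.2 [] hrest
  simp only [List.foldl_cons, hstep0]
  simp [this]
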